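-- pv_equiv track=rewrite | github.com/AutomataControls/AutomataNexus_Olympus_AGI2 | src/utils/pattern_detectors.py | _find_consistent_mapping
-- ===== SOURCE A (Python) =====
-- from typing import List, Dict, Tuple, Optional, Any
--
-- def _find_consistent_mapping(mappings: List[Dict[int, int]]) -> Optional[Dict[int, int]]:
--     """Find consistent color mapping across examples"""
--     if not mappings:
--         return None
--
--     # Start with first mapping
--     consistent = mappings[0].copy()
--
--     # Check consistency with other mappings
--     for mapping in mappings[1:]:
--         for color, target in mapping.items():
--             if color in consistent and consistent[color] != target:
--                 return None  # Inconsistent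
--             consistent[color] = target
--
--     return consistent
-- ===== SOURCE B (Python) =====
-- def _find_consistent_mapping(mappings):
--     """Find consistent color mapping across examples.
--
--     Different decomposition: dedup all (color, target) pairs across every
--     mapping in first-seen order; the merge is consistent iff no color then
--     appears twice, and the result is just dict() of the deduped pairs.
--     """
--     if not mappings:
--         return None
--     seen = set()
--     pairs = []
--     for mapping in mappings:
--         for item in mapping.items():
--             if item not in seen:
--                 seen.add(item)
--                 pairs.append(item)
--     colors = [c for c, _ in pairs]
--     if len(colors) != len(set(colors)):
--         return None
--     return dict(pairs)
-- ===== Notes on version B (the rewrite author's own statement) =====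
-- stated objective: alternative
-- what changed: Instead of merging dicts into one accumulator with an early-exit conflict check per item, B dedups all (color,target) pairs across every mapping into a set kept in first-seen order, then declares a conflict iff some color occurs twice among the deduped pairs and otherwise returns dict() of them.
import Mathlib
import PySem

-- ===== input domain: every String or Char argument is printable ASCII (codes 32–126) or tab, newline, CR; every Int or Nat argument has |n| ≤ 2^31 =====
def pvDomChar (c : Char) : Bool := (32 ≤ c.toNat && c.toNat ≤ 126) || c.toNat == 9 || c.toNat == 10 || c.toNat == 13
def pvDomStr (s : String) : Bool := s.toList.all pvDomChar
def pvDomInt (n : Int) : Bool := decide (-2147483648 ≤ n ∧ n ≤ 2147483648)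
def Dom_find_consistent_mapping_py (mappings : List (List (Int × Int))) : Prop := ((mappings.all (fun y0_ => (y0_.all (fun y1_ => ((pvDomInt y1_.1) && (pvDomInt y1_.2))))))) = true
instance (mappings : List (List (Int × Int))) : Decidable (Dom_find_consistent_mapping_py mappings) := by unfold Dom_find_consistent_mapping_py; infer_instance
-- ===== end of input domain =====

-- B replaces A's merge-with-early-exit loop by a set pass: dedup all (color,target) pairs in first-seen
-- order, then a single duplicate-color check; same cost, different algorithm ("alternative").


-- ===== PORT A =====
-- body of A's inner loop: 'if color in consistent and consistent[color] != target: return None; consistent[color] = target'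
def pvAStep (acc : Option (PySem.Dict Int Int)) (p : Int × Int) : Option (PySem.Dict Int Int) :=
  match acc with
  | none => none
  | some consistent =>
    match consistent.get? p.1 with
    | some t => if t ≠ p.2 then none else some (consistent.insert p.1 p.2)
    | none => some (consistent.insert p.1 p.2)

def find_consistent_mapping_py (mappings : List (List (Int × Int))) : Option (List (Int × Int)) :=
  match mappings with
  | [] => none                                            -- if not mappings: return None
  | m0 :: rest =>
    let consistent : PySem.Dict Int Int := PySem.Dict.mk m0   -- consistent = mappings[0].copy()
    -- for mapping in mappings[1:]: for color, target in mapping.items(): …  ('return None' = absorbing none state)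
    (rest.foldl (fun acc mapping => mapping.foldl pvAStep acc) (some consistent)).map PySem.Dict.items

-- ===== PORT B =====
def find_consistent_mapping_py_alt (mappings : List (List (Int × Int))) : Option (List (Int × Int)) :=
  match mappings with
  | [] => none                                            -- if not mappings: return None
  | m0 :: rest =>
    -- for mapping in mappings: for item in mapping.items(): if item not in seen: seen.add(item); pairs.append(item)
    -- (pairs IS the set 'seen' kept in first-insertion order: PySem.Set)
    let pairs : PySem.Set (Int × Int) :=
      (m0 :: rest).foldl (fun s mapping => PySem.Set.update s mapping) PySem.Set.empty
    let colors : List Int := pairs.map Prod.fst           -- colors = [c for c, _ in pairs]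
    if colors.length ≠ (PySem.Set.ofList colors).length then none   -- len(colors) != len(set(colors))
    else some (PySem.Dict.mk pairs).items                 -- return dict(pairs)

-- ===== PRECONDITION & SPEC =====
-- Pre_ is the dict-representation invariant only: each inner association list stands for a Python dict, so its
-- keys are pairwise distinct; lists with a duplicated key represent no Python input at all.
def Pre_find_consistent_mapping_py (mappings : List (List (Int × Int))) : Prop :=
  ∀ m ∈ mappings, (m.map Prod.fst).Nodup
instance (mappings : List (List (Int × Int))) : Decidable (Pre_find_consistent_mapping_py mappings) := by
  unfold Pre_find_consistent_mapping_py; infer_instance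

def pvWitness_find_consistent_mapping_py : (List (List (Int × Int))) := [[(0, 1)], [(2, 3)]]

def Spec_find_consistent_mapping_py (mappings : List (List (Int × Int))) (out : Option (List (Int × Int))) : Prop := out = find_consistent_mapping_py_alt mappings
instance (mappings : List (List (Int × Int))) (out : Option (List (Int × Int))) : Decidable (Spec_find_consistent_mapping_py mappings out) := by unfold Spec_find_consistent_mapping_py; infer_instance

-- ===== CLAIM (what is proved, stated in full; the proofs are below) =====
def Claim_equal_find_consistent_mapping_py : Prop := ∀ (mappings : List (List (Int × Int))), Dom_find_consistent_mapping_py mappings → Pre_find_consistent_mapping_py mappings → Spec_find_consistent_mapping_py mappings (find_consistent_mapping_py mappings)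

-- ===== LEMMAS AND PROOFS =====

-- 'every two pairs with the same key carry the same value'
def pvAllEq (l : List (Int × Int)) : Prop := ∀ p ∈ l, ∀ q ∈ l, p.1 = q.1 → p.2 = q.2

-- invariant of A's loop: the dict built so far agrees with every remaining pair, and the rest is self-consistent
def pvOk (d : PySem.Dict Int Int) (l : List (Int × Int)) : Prop :=
  (∀ q ∈ l, ∀ t, d.get? q.1 = some t → t = q.2) ∧ pvAllEq l

def pvIns (c : PySem.Dict Int Int) (p : Int × Int) : PySem.Dict Int Int := c.insert p.1 p.2

lemma pvAfold_none (l : List (Int × Int)) : l.foldl pvAStep none = none := by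
  induction l with
  | nil => rfl
  | cons p l ih => simpa [pvAStep] using ih

lemma pvOk_cons_iff (d : PySem.Dict Int Int) (p : Int × Int) (l : List (Int × Int))
    (hp : ∀ t, d.get? p.1 = some t → t = p.2) :
    pvOk d (p :: l) ↔ pvOk (d.insert p.1 p.2) l := by
  constructor
  · rintro ⟨h1, h2⟩
    refine ⟨?_, fun a ha b hb => h2 a (List.mem_cons_of_mem _ ha) b (List.mem_cons_of_mem _ hb)⟩
    intro q hq t ht
    rw [PySem.Dict.get?_insert] at ht
    by_cases hk : q.1 = p.1
    · simp [hk] at ht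
      subst ht
      exact (h2 p (List.mem_cons_self) q (List.mem_cons_of_mem _ hq) hk.symm)
    · rw [if_neg hk] at ht
      exact h1 q (List.mem_cons_of_mem _ hq) t ht
  · rintro ⟨h1, h2⟩
    constructor
    · intro q hq t ht
      rcases List.mem_cons.mp hq with rfl | hq
      · exact hp t ht
      · by_cases hk : q.1 = p.1
        · have := h1 q hq p.2 (by rw [PySem.Dict.get?_insert, if_pos hk])
          rw [hk] at ht
          exact (hp t ht).trans this
        · exact h1 q hq t (by rw [PySem.Dict.get?_insert, if_neg hk]; exact ht)
    · intro a ha b hb hab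
      rcases List.mem_cons.mp ha with ha' | ha'
      · subst ha'
        rcases List.mem_cons.mp hb with hb' | hb'
        · subst hb'; rfl
        · exact h1 b hb' a.2 (by rw [PySem.Dict.get?_insert, if_pos hab.symm])
      · rcases List.mem_cons.mp hb with hb' | hb'
        · subst hb'
          exact (h1 a ha' b.2 (by rw [PySem.Dict.get?_insert, if_pos hab])).symm
        · exact h2 a ha' b hb' hab

lemma pvAfold_eq_some (l : List (Int × Int)) : ∀ d, pvOk d l →
    l.foldl pvAStep (some d) = some (l.foldl pvIns d) := by
  induction l with
  | nil => intro d _; rfl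
  | cons p l ih =>
    intro d h
    have hp : ∀ t, d.get? p.1 = some t → t = p.2 := fun t ht => h.1 p List.mem_cons_self t ht
    have h' : pvOk (d.insert p.1 p.2) l := (pvOk_cons_iff d p l hp).mp h
    cases hg : d.get? p.1 with
    | none => simpa [List.foldl, pvAStep, hg, pvIns] using ih _ h'
    | some t =>
      have ht : t = p.2 := hp t hg
      simpa [List.foldl, pvAStep, hg, ht, pvIns] using ih _ h'

lemma pvAfold_eq_none (l : List (Int × Int)) : ∀ d, ¬ pvOk d l →
    l.foldl pvAStep (some d) = none := by
  induction l with
  | nil => intro d h; exact absurd ⟨fun q hq => absurd hq (List.not_mem_nil), fun p hp => absurd hp (List.not_mem_nil)⟩ h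
  | cons p l ih =>
    intro d h
    cases hg : d.get? p.1 with
    | none =>
      have hp : ∀ t, d.get? p.1 = some t → t = p.2 := by intro t ht; rw [hg] at ht; cases ht
      have h' : ¬ pvOk (d.insert p.1 p.2) l := fun hh => h ((pvOk_cons_iff d p l hp).mpr hh)
      simpa [List.foldl, pvAStep, hg] using ih _ h'
    | some t =>
      by_cases ht : t = p.2
      · have hp : ∀ t', d.get? p.1 = some t' → t' = p.2 := by
          intro t' ht'; rw [hg] at ht'; exact (Option.some.inj ht').symm.trans ht
        have h' : ¬ pvOk (d.insert p.1 p.2) l := fun hh => h ((pvOk_cons_iff d p l hp).mpr hh)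
        simpa [List.foldl, pvAStep, hg, ht] using ih _ h'
      · simp [List.foldl, pvAStep, hg, ht, pvAfold_none]

-- A on a nonempty list is its step-fold over the concatenation of all pairs, started from the empty dict
lemma pvA_char (m0 : List (Int × Int)) (rest : List (List (Int × Int)))
    (hnd : (m0.map Prod.fst).Nodup) :
    find_consistent_mapping_py (m0 :: rest)
      = (((m0 :: rest).flatten).foldl pvAStep (some PySem.Dict.empty)).map PySem.Dict.items := by
  have hinj : ∀ p ∈ m0, ∀ q ∈ m0, p.1 = q.1 → p = q := by
    intro p hp q hq h
    exact List.inj_on_of_nodup_map hnd hp hq h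
  have hok : pvOk PySem.Dict.empty m0 := by
    constructor
    · intro q _ t ht
      rw [PySem.Dict.get?_empty] at ht
      cases ht
    · intro p hp q hq h
      exact congrArg Prod.snd (hinj p hp q hq h)
  have hmk : m0.foldl pvIns PySem.Dict.empty = PySem.Dict.mk m0 := by
    apply PySem.Dict.ext
    have := PySem.Dict.items_foldl_insert_fresh (d := (PySem.Dict.empty : PySem.Dict Int Int))
      (l := m0) (k := Prod.fst) (v := Prod.snd)
      (by intro a _; exact PySem.Dict.contains_empty _) hnd
    simpa [pvIns] using this
  have h0 : some (PySem.Dict.mk m0) = m0.foldl pvAStep (some PySem.Dict.empty) := by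
    rw [pvAfold_eq_some m0 _ hok, hmk]
  show ((rest.foldl (fun acc mapping => mapping.foldl pvAStep acc) (some (PySem.Dict.mk m0))).map PySem.Dict.items) = _
  rw [h0, List.flatten_cons, List.foldl_append, List.foldl_flatten]

-- B's first loop is set(·) of the concatenation of all pairs
lemma pvB_pairs (m0 : List (Int × Int)) (rest : List (List (Int × Int))) :
    (m0 :: rest).foldl (fun s mapping => PySem.Set.update s mapping) PySem.Set.empty
      = PySem.Set.ofList ((m0 :: rest).flatten) := by
  rw [PySem.Set.ofList_eq_foldl, List.foldl_flatten]
  rfl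

-- the dedup of xs is a sublist of xs
lemma pvOfList_sublist {α : Type} [BEq α] [LawfulBEq α] (xs : List α) :
    (PySem.Set.ofList xs).Sublist xs := by
  induction xs with
  | nil => simp [PySem.Set.ofList_nil]
  | cons x xs ih =>
    rw [PySem.Set.ofList_cons]
    refine List.Sublist.cons₂ x (List.Sublist.trans ?_ ih)
    simp only [PySem.Set.discard]
    exact List.filter_sublist

-- 'len(xs) == len(set(xs))' is the Nodup test
lemma pvLen_ofList_eq_iff {α : Type} [BEq α] [LawfulBEq α] (xs : List α) :
    xs.length = (PySem.Set.ofList xs).length ↔ xs.Nodup := by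
  constructor
  · intro h
    have := (pvOfList_sublist xs).eq_of_length h.symm
    rw [← this]
    exact PySem.Set.nodup_ofList xs
  · intro h
    rw [PySem.Set.ofList_eq_self_of_nodup _ h]

-- under global consistency, A's accumulated dict lists exactly the deduped pairs
lemma pvItems_eq_ofList (flat : List (Int × Int)) (h : pvAllEq flat) :
    (flat.foldl pvIns PySem.Dict.empty).items = PySem.Set.ofList flat := by
  induction flat using List.reverseRecOn with
  | nil => rfl
  | append_singleton l p ih =>
    have hsub : pvAllEq l := fun a ha b hb => h a (List.mem_append_left _ ha) b (List.mem_append_left _ hb)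
    have hitems := ih hsub
    have hnd : (l.foldl pvIns PySem.Dict.empty).keys.Nodup := by
      have := PySem.Dict.nodup_keys_foldl_insert_key (l := l) (key := Prod.fst)
        (f := fun _ p => p.2) (d := (PySem.Dict.empty : PySem.Dict Int Int))
        PySem.Dict.nodup_keys_empty
      simpa [pvIns] using this
    rw [List.foldl_append, List.foldl_cons, List.foldl_nil, PySem.Set.ofList_append_singleton]
    set d := l.foldl pvIns PySem.Dict.empty with hd
    by_cases hc : d.contains p.1 = true
    · -- key already there; by consistency the stored value is p.2, so the insert is the identity on items
      have hk := (PySem.Dict.contains_iff_mem_keys _ _).mp hc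
      have hkeys : d.keys = d.items.map Prod.fst := rfl
      rw [hkeys, hitems] at hk
      rcases List.mem_map.mp hk with ⟨q, hq, hqk⟩
      have hqflat : q ∈ l := (PySem.Set.mem_ofList l q).mp hq
      have hqv : q.2 = p.2 :=
        h q (List.mem_append_left _ hqflat) p (List.mem_append_right _ List.mem_cons_self) hqk
      have hq' : q = p := Prod.ext hqk hqv
      have hmem : p ∈ PySem.Set.ofList l := hq' ▸ hq
      show (d.insert p.1 p.2).items = _
      rw [PySem.Dict.items_insert_of_contains d _ hc, PySem.Set.add_of_mem hmem, hitems]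
      refine (List.map_congr_left ?_).trans (List.map_id _)
      intro r hr
      by_cases hrk : r.1 = p.1
      · -- keys are unique in d.items, so r is q = p and the rewrite is the identity
        have hrq : r = q := by
          have hnd' : d.items.map Prod.fst |>.Nodup := by rw [← hkeys]; exact hnd
          exact List.inj_on_of_nodup_map hnd' (hitems.symm ▸ hr) (hitems.symm ▸ hq) (hrk.trans hqk.symm)
        simp [hrq, hq']
      · simp [hrk]
    · have hnm : p ∉ PySem.Set.ofList l := by
        intro hm
        have : p.1 ∈ d.keys := by
          rw [show d.keys = d.items.map Prod.fst from rfl, hitems]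
          exact List.mem_map.mpr ⟨p, hm, rfl⟩
        exact hc ((PySem.Dict.contains_iff_mem_keys _ _).mpr this)
      show (d.insert p.1 p.2).items = _
      rw [PySem.Dict.items_insert_of_not_contains d _ (by simpa using hc),
        PySem.Set.add_of_not_mem hnm, hitems]

-- global consistency is the duplicate-color test on the deduped pairs
lemma pvAllEq_iff_nodup (flat : List (Int × Int)) :
    pvAllEq flat ↔ ((PySem.Set.ofList flat).map Prod.fst).Nodup := by
  constructor
  · intro h
    refine List.Nodup.map_on ?_ (PySem.Set.nodup_ofList flat)
    intro p hp q hq hk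
    exact Prod.ext hk (h p ((PySem.Set.mem_ofList flat p).mp hp) q ((PySem.Set.mem_ofList flat q).mp hq) hk)
  · intro h p hp q hq hk
    have hp' := (PySem.Set.mem_ofList flat p).mpr hp
    have hq' := (PySem.Set.mem_ofList flat q).mpr hq
    exact congrArg Prod.snd (List.inj_on_of_nodup_map h hp' hq' hk)

-- ===== VERDICT (by name: the statement is the Claim_ definition above) =====
theorem find_consistent_mapping_py_spec : Claim_equal_find_consistent_mapping_py := by
  intro mappings _ hpre
  unfold Spec_find_consistent_mapping_py
  match mappings with
  | [] => rfl
  | m0 :: rest =>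
    have hnd : (m0.map Prod.fst).Nodup := hpre m0 List.mem_cons_self
    rw [pvA_char m0 rest hnd]
    show _ = (if ((((m0 :: rest).foldl (fun s mapping => PySem.Set.update s mapping) PySem.Set.empty).map Prod.fst).length ≠ (PySem.Set.ofList (((m0 :: rest).foldl (fun s mapping => PySem.Set.update s mapping) PySem.Set.empty).map Prod.fst)).length) then none else some (PySem.Dict.mk ((m0 :: rest).foldl (fun s mapping => PySem.Set.update s mapping) PySem.Set.empty)).items)
    rw [pvB_pairs]
    set flat := (m0 :: rest).flatten with hflat
    by_cases hgood : pvAllEq flat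
    · have hok : pvOk PySem.Dict.empty flat := by
        refine ⟨?_, hgood⟩
        intro q _ t ht
        rw [PySem.Dict.get?_empty] at ht
        cases ht
      have hcn : ((PySem.Set.ofList flat).map Prod.fst).Nodup := (pvAllEq_iff_nodup flat).mp hgood
      have hlen : ((PySem.Set.ofList flat).map Prod.fst).length
          = (PySem.Set.ofList ((PySem.Set.ofList flat).map Prod.fst)).length :=
        (pvLen_ofList_eq_iff _).mpr hcn
      rw [pvAfold_eq_some flat _ hok, if_neg (by simpa using hlen)]
      simp only [Option.map_some]
      congr 1
      rw [pvItems_eq_ofList flat hgood]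
    · have hcn : ¬ ((PySem.Set.ofList flat).map Prod.fst).Nodup :=
        fun hh => hgood ((pvAllEq_iff_nodup flat).mpr hh)
      have hlen : ((PySem.Set.ofList flat).map Prod.fst).length
          ≠ (PySem.Set.ofList ((PySem.Set.ofList flat).map Prod.fst)).length :=
        fun hh => hcn ((pvLen_ofList_eq_iff _).mp hh)
      rw [pvAfold_eq_none flat _ (fun hh => hgood hh.2), if_pos hlen]
      rfl
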